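-- pv_equiv track=rewrite | github.com/billowdev/basic-ai-algorithm | _1_bfs_dfs/dfs.py | extend_path
-- ===== SOURCE A (Python) =====
-- def extend_path(path, next_state, explored):
-- 	if(len(next_state)<1):
-- 		return []
-- 	elif next_state[0] in path:
-- 		next_state.pop(0)
-- 		return extend_path(path, next_state, explored)
-- 	elif next_state[0] in explored:
-- 		next_state.pop(0)
-- 		return extend_path(path, next_state, explored)
-- 	else:
-- 		el = next_state.pop(0)
-- 		explored.append(el)
-- 		return [[el]+path] + extend_path(path, next_state, explored)
-- ===== SOURCE B (Python) =====
-- def extend_path(path, next_state, explored):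
--     result = []
--     while next_state:
--         el = next_state.pop(0)
--         if el in path or el in explored:
--             continue
--         explored.append(el)
--         result.append([el] + path)
--     return result
-- ===== Notes on version B (the rewrite author's own statement) =====
-- stated objective: simpler
-- what changed: Replaced the recursion (which prepends [[el]+path] to a recursive call) with an iterative while-loop that pops from the front and appends each new path to an accumulator list, returned at the end.
import Mathlib
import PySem

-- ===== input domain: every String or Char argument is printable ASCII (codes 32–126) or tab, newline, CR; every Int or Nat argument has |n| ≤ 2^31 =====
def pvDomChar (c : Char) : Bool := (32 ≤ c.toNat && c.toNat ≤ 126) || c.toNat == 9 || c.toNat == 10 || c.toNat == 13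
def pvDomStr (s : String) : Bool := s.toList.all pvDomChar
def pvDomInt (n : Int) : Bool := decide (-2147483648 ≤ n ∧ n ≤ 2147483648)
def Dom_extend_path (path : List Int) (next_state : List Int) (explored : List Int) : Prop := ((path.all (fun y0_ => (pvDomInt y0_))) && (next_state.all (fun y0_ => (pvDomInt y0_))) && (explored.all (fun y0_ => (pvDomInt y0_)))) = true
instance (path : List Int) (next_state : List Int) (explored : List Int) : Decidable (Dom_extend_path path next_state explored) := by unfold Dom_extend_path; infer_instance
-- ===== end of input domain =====

-- B replaces A's recursion by an iterative pop-from-front loop with a result accumulator (simpler decomposition;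
-- equivalence is about the RETURN value; both Pythons mutate next_state (emptied) and explored (new elements appended) identically).

-- ===== PORT A =====
-- A: recursion on next_state; prepends [[el]+path] to the recursive call for each new element.
def extend_path (path : List Int) (next_state : List Int) (explored : List Int) : List (List Int) :=
  match next_state with
  | [] => []
  | x :: rest =>
    if x ∈ path then
      extend_path path rest explored
    else if x ∈ explored then
      extend_path path rest explored
    else
      ([x] ++ path) :: extend_path path rest (explored ++ [x])

-- ===== PORT B =====
-- B: while-loop over next_state with an explicit result accumulator, appended at the back.
def extendPathLoop (path : List Int) (next_state : List Int) (explored : List Int) (result : List (List Int)) : List (List Int) :=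
  match next_state with
  | [] => result
  | el :: rest =>
    if el ∈ path ∨ el ∈ explored then
      extendPathLoop path rest explored result
    else
      extendPathLoop path rest (explored ++ [el]) (result ++ [[el] ++ path])

def extend_path_alt (path : List Int) (next_state : List Int) (explored : List Int) : List (List Int) :=
  extendPathLoop path next_state explored []

-- ===== PRECONDITION & SPEC =====
def Spec_extend_path (path : List Int) (next_state : List Int) (explored : List Int) (out : List (List Int)) : Prop := out = extend_path_alt path next_state explored
instance (path : List Int) (next_state : List Int) (explored : List Int) (out : List (List Int)) : Decidable (Spec_extend_path path next_state explored out) := by unfold Spec_extend_path; infer_instance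

-- ===== CLAIM (what is proved, stated in full; the proofs are below) =====
def Claim_equal_extend_path : Prop := ∀ (path : List Int) (next_state : List Int) (explored : List Int), Dom_extend_path path next_state explored → Spec_extend_path path next_state explored (extend_path path next_state explored)

-- ===== LEMMAS AND PROOFS =====

-- The loop with accumulator `result` computes `result ++` A's recursive value.
theorem extendPathLoop_eq (path : List Int) (next_state : List Int) :
    ∀ (explored : List Int) (result : List (List Int)),
      extendPathLoop path next_state explored result = result ++ extend_path path next_state explored := by
  induction next_state with
  | nil => intro explored result; simp [extendPathLoop, extend_path]
  | cons x rest ih =>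
    intro explored result
    by_cases hp : x ∈ path
    · simp [extendPathLoop, extend_path, hp, ih]
    · by_cases he : x ∈ explored
      · simp [extendPathLoop, extend_path, hp, he, ih]
      · simp [extendPathLoop, extend_path, hp, he, ih]

-- ===== VERDICT (by name: the statement is the Claim_ definition above) =====
theorem extend_path_spec : Claim_equal_extend_path := by
  intro path next_state explored _
  unfold Spec_extend_path extend_path_alt
  simp [extendPathLoop_eq]
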